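-- pv_equiv track=rewrite | github.com/ValerioBelcamino/pdiddyelle | partial_plan_progressor.py | _count_instructions
-- ===== SOURCE A (Python) =====
-- from typing import Optional, Tuple
--
-- def _extract_plan_prefix(plan_text: str, instruction_count: int) -> str:
--     if instruction_count <= 0 or not plan_text:
--         return ""
--     collected = []
--     seen = 0
--     for line in plan_text.splitlines(keepends=True):
--         collected.append(line)
--         if ":" in line:
--             seen += 1
--             if seen == instruction_count:
--                 break
--     return "".join(collected)
--
-- def _count_instructions(plan_text: str) -> Tuple[int, str]:
--     if not plan_text:
--         return 0, ""
--     executed = 0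
--     for line in plan_text.splitlines():
--         if ":" in line:
--             executed += 1
--     return executed, _extract_plan_prefix(plan_text, executed)
-- ===== SOURCE B (Python) =====
-- from typing import Tuple
--
-- def _count_instructions(plan_text: str) -> Tuple[int, str]:
--     if not plan_text:
--         return 0, ""
--     lines = plan_text.splitlines(keepends=True)
--     count = 0
--     last = 0
--     for i, line in enumerate(lines):
--         if ":" in line:
--             count += 1
--             last = i + 1
--     return count, "".join(lines[:last])
-- ===== Notes on version B (the rewrite author's own statement) =====
-- stated objective: simpler
-- what changed: One splitlines(keepends=True) pass recording the count and the index after the last colon line, then a single slice-and-join, instead of A's count pass over splitlines() plus a second collecting scan with a break inside a helper.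
import Mathlib
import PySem

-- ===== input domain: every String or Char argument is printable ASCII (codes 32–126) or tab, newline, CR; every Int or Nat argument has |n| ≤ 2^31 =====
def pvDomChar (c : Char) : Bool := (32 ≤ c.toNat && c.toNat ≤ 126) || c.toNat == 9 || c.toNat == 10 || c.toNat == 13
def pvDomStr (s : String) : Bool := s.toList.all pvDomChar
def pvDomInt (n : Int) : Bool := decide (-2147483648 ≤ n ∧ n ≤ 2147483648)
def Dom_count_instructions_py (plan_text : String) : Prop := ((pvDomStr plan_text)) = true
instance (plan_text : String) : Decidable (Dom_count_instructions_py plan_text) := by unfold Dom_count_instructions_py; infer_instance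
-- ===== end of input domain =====

-- B: one splitlines(keepends=True) pass recording the count and the index after the last colon line, replacing A's count pass plus a second collecting scan (same cost, simpler).


-- ===== PORT A =====
-- shared hand port of str.splitlines(keepends=True) (PySem only provides keepends=False):
-- exact on Dom, where the only line boundaries are '\n', '\r' and '\r\n' (the remaining
-- Python boundary characters \x0b \x0c \x1c \x1d \x1e \x85 U+2028 U+2029 lie outside Dom).
def pvIsNL (c : Char) : Bool := c == '\n' || c == '\r'

def splitKeepGo : List Char → List Char → List (List Char)
  | [], cur => if cur.isEmpty then [] else [cur.reverse]
  | '\r' :: '\n' :: rest, cur => (cur.reverse ++ ['\r', '\n']) :: splitKeepGo rest []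
  | c :: rest, cur =>
      if pvIsNL c then (cur.reverse ++ [c]) :: splitKeepGo rest []
      else splitKeepGo rest (c :: cur)

-- for line in …splitlines(keepends=True): collected.append(line); if ':' in line: seen += 1; if seen == instruction_count: break
def extractGo (instruction_count : Int) : List (List Char) → Int → List Char
  | [], _ => []
  | line :: rest, seen =>
      if PySem.Chars.isIn [':'] line then
        if seen + 1 == instruction_count then line
        else line ++ extractGo instruction_count rest (seen + 1)
      else line ++ extractGo instruction_count rest seen

def extract_plan_prefix (plan_text : String) (instruction_count : Int) : String :=
  if instruction_count ≤ 0 || plan_text == "" then ""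
  else String.ofList (extractGo instruction_count (splitKeepGo plan_text.toList []) 0)

def count_instructions_py (plan_text : String) : Int × String :=
  if plan_text == "" then (0, "")
  else
    let executed : Int := (PySem.Str.splitlines plan_text).foldl
      (fun e line => if PySem.Str.isIn ":" line then e + 1 else e) 0
    (executed, extract_plan_prefix plan_text executed)

-- ===== PORT B =====
def count_instructions_py_alt (plan_text : String) : Int × String :=
  if plan_text == "" then (0, "")
  else
    let lines := splitKeepGo plan_text.toList []
    let st := (PySem.List.enumerate lines).foldl
      (fun (st : Int × Int) il =>
        if PySem.Chars.isIn [':'] il.2 then (st.1 + 1, il.1 + 1) else st) (0, 0)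
    -- lines[:last] with last = st.2 ≥ 0 is lines.take st.2.toNat
    (st.1, String.ofList (List.flatten (lines.take st.2.toNat)))

-- ===== PRECONDITION & SPEC =====
def Spec_count_instructions_py (plan_text : String) (out : Int × String) : Prop := out = count_instructions_py_alt plan_text
instance (plan_text : String) (out : Int × String) : Decidable (Spec_count_instructions_py plan_text out) := by unfold Spec_count_instructions_py; infer_instance

-- ===== CLAIM (what is proved, stated in full; the proofs are below) =====
def Claim_equal_count_instructions_py : Prop := ∀ (plan_text : String), Dom_count_instructions_py plan_text → Spec_count_instructions_py plan_text (count_instructions_py plan_text)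

-- ===== LEMMAS AND PROOFS =====

-- number of colon-containing lines
def cntColon (ls : List (List Char)) : Nat :=
  (ls.filter (PySem.Chars.isIn [':'])).length

theorem cntColon_cons (l : List Char) (rest : List (List Char)) :
    cntColon (l :: rest) = (if PySem.Chars.isIn [':'] l then 1 else 0) + cntColon rest := by
  by_cases h : PySem.Chars.isIn [':'] l
  · simp [cntColon, List.filter_cons_of_pos h, h]; omega
  · simp [cntColon, List.filter_cons_of_neg (by simpa using h), h]

-- position just after the last colon-containing line (0 when there is none)
def lastPos : List (List Char) → Nat
  | [] => 0
  | l :: rest =>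
      if cntColon rest = 0 then (if PySem.Chars.isIn [':'] l then 1 else 0)
      else 1 + lastPos rest

-- a colon survives stripping the line terminators
theorem dropNL_colon (l : List Char) :
    PySem.Chars.isIn [':'] (l.filter (fun c => !pvIsNL c)) = PySem.Chars.isIn [':'] l := by
  by_cases h : (':' : Char) ∈ l
  · have h2 : (':' : Char) ∈ l.filter (fun c => !pvIsNL c) :=
      List.mem_filter.mpr ⟨h, by decide⟩
    rw [(PySem.Chars.isIn_iff_infix _ _).mpr ((List.singleton_infix_iff _ _).mpr h2),
        (PySem.Chars.isIn_iff_infix _ _).mpr ((List.singleton_infix_iff _ _).mpr h)]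
  · rw [(PySem.Chars.isIn_eq_false_iff _ _).mpr, (PySem.Chars.isIn_eq_false_iff _ _).mpr]
    · intro hc; exact h ((List.singleton_infix_iff _ _).mp hc)
    · intro hc; exact h (List.mem_filter.mp ((List.singleton_infix_iff _ _).mp hc)).1

-- keepends=False splitlines agrees with (keepends=True lines with terminators stripped) on Dom
theorem splitlines_go_eq (isB : Char → Bool)
    (hB : ∀ c, pvDomChar c = true → isB c = pvIsNL c) :
    ∀ (cs cur : List Char) (acc : List (List Char)),
    (∀ c ∈ cs, pvDomChar c = true) → (∀ c ∈ cur, pvIsNL c = false) →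
    PySem.Chars.splitlines.go isB cs cur acc
      = acc.reverse ++ (splitKeepGo cs cur).map (fun l => l.filter (fun c => !pvIsNL c)) := by
  intro cs cur
  induction cs, cur using splitKeepGo.induct with
  | case1 cur hcur =>
      intro acc _ hc
      simp only [PySem.Chars.splitlines.go, splitKeepGo, hcur, if_pos]
      simp
  | case2 cur hcur =>
      intro acc _ hc
      simp only [PySem.Chars.splitlines.go, splitKeepGo, hcur, if_neg]
      have : cur.reverse.filter (fun c => !pvIsNL c) = cur.reverse := by
        apply List.filter_eq_self.mpr
        intro c hcm
        simp [hc c (List.mem_reverse.mp hcm)]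
      simp [this, hcur]
  | case3 rest cur ih =>
      intro acc hcs hc
      rw [PySem.Chars.splitlines.go.eq_2, splitKeepGo.eq_2,
        ih (cur.reverse :: acc) (fun c hm => hcs c (by simp [hm])) (by simp)]
      have : cur.reverse.filter (fun c => !pvIsNL c) = cur.reverse := by
        apply List.filter_eq_self.mpr
        intro c hcm
        simp [hc c (List.mem_reverse.mp hcm)]
      simp [this]
      exact ⟨by decide, by decide⟩
  | case4 c rest cur hne hnl ih =>
      intro acc hcs hc
      rw [PySem.Chars.splitlines.go.eq_3 isB cur acc c rest hne, splitKeepGo.eq_3 cur c rest hne]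
      have hb : isB c = true := by
        rw [hB c (hcs c (by simp))]; exact hnl
      rw [if_pos hb, if_pos hnl,
        ih (cur.reverse :: acc) (fun d hm => hcs d (by simp [hm])) (by simp)]
      have : cur.reverse.filter (fun d => !pvIsNL d) = cur.reverse := by
        apply List.filter_eq_self.mpr
        intro d hcm
        simp [hc d (List.mem_reverse.mp hcm)]
      simp [this, hnl]
  | case5 c rest cur hne hnl ih =>
      intro acc hcs hc
      rw [PySem.Chars.splitlines.go.eq_3 isB cur acc c rest hne, splitKeepGo.eq_3 cur c rest hne]
      have hb : isB c = false := by
        rw [hB c (hcs c (by simp))]; simpa using hnl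
      rw [if_neg (by simp [hb]), if_neg hnl,
        ih acc (fun d hm => hcs d (by simp [hm]))
          (by intro d hm; rcases List.mem_cons.mp hm with h | h
              · subst h; simpa using hnl
              · exact hc d h)]

theorem foldl_cnt (ls : List (List Char)) : ∀ (e : Int),
    ls.foldl (fun e l => if PySem.Chars.isIn [':'] l then e + 1 else e) e = e + cntColon ls := by
  induction ls with
  | nil => intro e; simp [cntColon]
  | cons l rest ih =>
      intro e
      by_cases h : PySem.Chars.isIn [':'] l
      · simp only [List.foldl_cons, h, if_pos, ih, cntColon_cons]
        push_cast; ring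
      · simp only [List.foldl_cons, h, if_neg, Bool.false_eq_true, not_false_iff, ih, cntColon_cons]
        simp [h]

theorem foldl_enum (ls : List (List Char)) : ∀ (n c last : Int),
    (PySem.List.enumerate ls n).foldl
      (fun (st : Int × Int) il => if PySem.Chars.isIn [':'] il.2 then (st.1 + 1, il.1 + 1) else st) (c, last)
      = (c + cntColon ls, if cntColon ls = 0 then last else n + lastPos ls) := by
  induction ls with
  | nil => intro n c last; simp [PySem.List.enumerate, cntColon, lastPos]
  | cons l rest ih =>
      intro n c last
      rw [show PySem.List.enumerate (l :: rest) n = (n, l) :: PySem.List.enumerate rest (n + 1) from rfl,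
        List.foldl_cons, cntColon_cons, lastPos]
      by_cases h : PySem.Chars.isIn [':'] l
      · rw [if_pos h, ih, if_pos h]
        by_cases h0 : cntColon rest = 0
        · simp [h0]
        · have h1 : ¬ (1 + cntColon rest = 0) := by omega
          rw [if_neg h0, if_neg h1, if_neg h0]
          refine Prod.ext ?_ ?_ <;> simp <;> push_cast <;> ring
      · rw [if_neg h, ih, if_neg h]
        by_cases h0 : cntColon rest = 0
        · simp [h0]
        · have h1 : ¬ (0 + cntColon rest = 0) := by omega
          rw [if_neg h0, if_neg h1, if_neg h0]
          refine Prod.ext ?_ ?_ <;> simp <;> push_cast <;> ring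

theorem extractGo_eq (ls : List (List Char)) : ∀ (seen : Int), cntColon ls ≠ 0 →
    extractGo (seen + cntColon ls) ls seen = (ls.take (lastPos ls)).flatten := by
  induction ls with
  | nil => intro seen h; simp [cntColon] at h
  | cons l rest ih =>
      intro seen h
      by_cases hc : PySem.Chars.isIn [':'] l
      · have hcnt : cntColon (l :: rest) = 1 + cntColon rest := by
          rw [cntColon_cons]; simp [hc]
        by_cases h0 : cntColon rest = 0
        · have heq : (seen + 1 == seen + (cntColon (l :: rest) : Int)) = true := by
            simp [hcnt, h0]
          simp [extractGo, hc, heq, lastPos, h0]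
        · have hne : (seen + 1 == seen + (cntColon (l :: rest) : Int)) = false := by
            simp [hcnt]; omega
          have hrec := ih (seen + 1) h0
          simp only [extractGo, hc, if_pos, hne, Bool.false_eq_true, if_neg, not_false_iff]
          rw [show seen + (cntColon (l :: rest) : Int) = (seen + 1) + cntColon rest by
            rw [hcnt]; push_cast; ring]
          rw [hrec]
          simp [lastPos, h0, List.take_succ_cons, Nat.add_comm 1 (lastPos rest)]
      · have hcnt : cntColon (l :: rest) = cntColon rest := by
          rw [cntColon_cons]; simp [hc]
        have h0 : cntColon rest ≠ 0 := by rw [← hcnt]; exact h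
        have hrec := ih seen h0
        simp only [extractGo, hc, Bool.false_eq_true, if_neg, not_false_iff]
        rw [hcnt, hrec]
        simp [lastPos, h0, hcnt, List.take_succ_cons, Nat.add_comm 1 (lastPos rest)]

-- a Dom character is a splitlines boundary iff it is '\n' or '\r'
theorem char_nl (c : Char) (hc : pvDomChar c = true) :
    (decide (c.toNat = 10) || decide (c.toNat = 13) || decide (c.toNat = 11) || decide (c.toNat = 12)
      || decide (c.toNat = 28) || decide (c.toNat = 29) || decide (c.toNat = 30) || decide (c.toNat = 133)
      || decide (c.toNat = 8232) || decide (c.toNat = 8233)) = pvIsNL c := by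
  have hn : (32 ≤ c.toNat ∧ c.toNat ≤ 126) ∨ c.toNat = 9 ∨ c.toNat = 10 ∨ c.toNat = 13 := by
    simpa [pvDomChar, or_assoc] using hc
  have e10 : (c == '\n') = decide (c.toNat = 10) := by
    by_cases hx : c.toNat = 10
    · rw [show c = '\n' by rw [← Char.ofNat_toNat c, hx]]; simp
    · have : ¬ c = '\n' := by intro he; exact hx (by rw [he]; decide)
      simp [this, hx]
  have e13 : (c == '\r') = decide (c.toNat = 13) := by
    by_cases hx : c.toNat = 13
    · rw [show c = '\r' by rw [← Char.ofNat_toNat c, hx]]; simp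
    · have : ¬ c = '\r' := by intro he; exact hx (by rw [he]; decide)
      simp [this, hx]
  simp only [pvIsNL, e10, e13]
  have h11 : c.toNat ≠ 11 := by omega
  have h12 : c.toNat ≠ 12 := by omega
  have h28 : c.toNat ≠ 28 := by omega
  have h29 : c.toNat ≠ 29 := by omega
  have h30 : c.toNat ≠ 30 := by omega
  have h133 : c.toNat ≠ 133 := by omega
  have h8232 : c.toNat ≠ 8232 := by omega
  have h8233 : c.toNat ≠ 8233 := by omega
  simp [h11, h12, h28, h29, h30, h133, h8232, h8233]

-- ===== VERDICT (by name: the statement is the Claim_ definition above) =====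
theorem count_instructions_py_spec : Claim_equal_count_instructions_py := by
  intro s hdom
  show count_instructions_py s = count_instructions_py_alt s
  by_cases hs : s = ""
  · simp [count_instructions_py, count_instructions_py_alt, hs]
  · have hdom' : ∀ c ∈ s.toList, pvDomChar c = true := by
      simpa [Dom_count_instructions_py, pvDomStr, List.all_eq_true] using hdom
    have hsplit : PySem.Chars.splitlines s.toList
        = (splitKeepGo s.toList []).map (fun l => l.filter (fun c => !pvIsNL c)) := by
      simp only [PySem.Chars.splitlines]
      rw [splitlines_go_eq _ (fun c hc => char_nl c hc) s.toList [] [] hdom' (by simp)]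
      simp
    have hbeq : (s == "") = false := by simpa using hs
    have hexec : (PySem.Str.splitlines s).foldl
        (fun e line => if PySem.Str.isIn ":" line then e + 1 else e) (0 : Int)
        = (cntColon (splitKeepGo s.toList []) : Int) := by
      rw [show PySem.Str.splitlines s
            = (PySem.Chars.splitlines s.toList).map String.ofList from rfl,
        List.foldl_map, hsplit, List.foldl_map]
      simp only [PySem.Str.isIn, String.toList_ofList, show (":" : String).toList = [':'] from rfl,
        dropNL_colon]
      rw [foldl_cnt]
      simp
    simp only [count_instructions_py, count_instructions_py_alt, hbeq, Bool.false_eq_true,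
      if_neg, not_false_iff, hexec]
    rw [foldl_enum (splitKeepGo s.toList []) 0 0 0]
    by_cases h0 : cntColon (splitKeepGo s.toList []) = 0
    · simp [h0, extract_plan_prefix]
    · have hpos : ¬ ((cntColon (splitKeepGo s.toList []) : Int) ≤ 0) := by
        omega
      simp only [extract_plan_prefix, hbeq, Bool.or_eq_true, decide_eq_true_eq, hpos,
        false_or, if_neg, not_false_iff, h0, if_false]
      have := extractGo_eq (splitKeepGo s.toList []) 0 h0
      rw [zero_add] at this
      rw [this]
      simp [h0]
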